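-- pv_equiv track=rewrite | github.com/stefantrost/loki-code | src/loki_code/core/prompts/context.py | _identify_key_files
-- ===== SOURCE A (Python) =====
-- from typing import Dict, List, Optional, Any, Union
--
-- def _identify_key_files(code_files: List[str]) -> List[str]:
--     """Identify key files in the project."""
--     key_patterns = [
--         'main.py', 'app.py', 'index.js', 'index.ts', 'main.rs', 'main.go',
--         'setup.py', 'package.json', 'Cargo.toml', 'go.mod',
--         'README.md', 'README.txt', 'requirements.txt'
--     ]
--
--     key_files = []
--     for pattern in key_patterns:
--         matching_files = [f for f in code_files if f.endswith(pattern)]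
--         key_files.extend(matching_files[:1])  # Take first match
--
--     return key_files[:10]  # Limit to 10 key files
-- ===== SOURCE B (Python) =====
-- def _identify_key_files(code_files):
--     """Identify key files in the project."""
--     key_patterns = [
--         'main.py', 'app.py', 'index.js', 'index.ts', 'main.rs', 'main.go',
--         'setup.py', 'package.json', 'Cargo.toml', 'go.mod',
--         'README.md', 'README.txt', 'requirements.txt'
--     ]
--
--     found = {}
--     for f in code_files:
--         for p in key_patterns:
--             if p not in found and f.endswith(p):
--                 found[p] = f
--
--     return [found[p] for p in key_patterns if p in found][:10]
-- ===== Notes on version B (the rewrite author's own statement) =====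
-- stated objective: alternative
-- what changed: Replaces the 13 per-pattern full scans of code_files with a single pass over code_files that records, in a dict keyed by pattern, the first file ending with each pattern; the result is then read off in pattern order and trimmed to 10.
import Mathlib
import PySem

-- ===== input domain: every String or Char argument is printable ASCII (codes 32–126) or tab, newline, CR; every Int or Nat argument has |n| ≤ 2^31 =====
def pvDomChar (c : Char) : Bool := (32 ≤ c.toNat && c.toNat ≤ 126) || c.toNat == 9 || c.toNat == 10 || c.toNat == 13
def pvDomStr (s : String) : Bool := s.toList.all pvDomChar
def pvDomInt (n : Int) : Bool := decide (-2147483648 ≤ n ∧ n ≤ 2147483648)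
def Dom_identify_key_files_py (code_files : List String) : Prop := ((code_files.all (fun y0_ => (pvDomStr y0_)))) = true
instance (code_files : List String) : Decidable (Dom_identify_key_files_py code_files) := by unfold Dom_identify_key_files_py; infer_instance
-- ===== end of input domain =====

-- B replaces A's 13 per-pattern scans of code_files by ONE pass that indexes the
-- first matching file per pattern in a dict; same return value (objective: alternative).

-- shared constant data: the key_patterns literal both Pythons begin with
def keyPatterns : List String :=
  ["main.py", "app.py", "index.js", "index.ts", "main.rs", "main.go",
   "setup.py", "package.json", "Cargo.toml", "go.mod",
   "README.md", "README.txt", "requirements.txt"]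

-- ===== PORT A =====
-- for pattern in key_patterns: key_files.extend([f for f in code_files if f.endswith(pattern)][:1]); return key_files[:10]
def identify_key_files_py (code_files : List String) : List String :=
  (keyPatterns.foldl
    (fun key_files pattern =>
      key_files ++ (code_files.filter (fun f => PySem.Str.endswith f pattern)).take 1)
    []).take 10

-- ===== PORT B =====
-- for f in code_files: for p in key_patterns: if p not in found and f.endswith(p): found[p] = f
def identify_key_files_py_alt_found (code_files : List String) : PySem.Dict String String :=
  code_files.foldl
    (fun found f =>
      keyPatterns.foldl
        (fun found p =>
          if !found.contains p && PySem.Str.endswith f p then found.insert p f else found)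
        found)
    PySem.Dict.empty

-- return [found[p] for p in key_patterns if p in found][:10]
def identify_key_files_py_alt (code_files : List String) : List String :=
  (keyPatterns.filterMap (fun p => (identify_key_files_py_alt_found code_files).get? p)).take 10

-- ===== PRECONDITION & SPEC =====
def Spec_identify_key_files_py (code_files : List String) (out : List String) : Prop := out = identify_key_files_py_alt code_files
instance (code_files : List String) (out : List String) : Decidable (Spec_identify_key_files_py code_files out) := by unfold Spec_identify_key_files_py; infer_instance

-- ===== CLAIM (what is proved, stated in full; the proofs are below) =====
def Claim_equal_identify_key_files_py : Prop := ∀ (code_files : List String), Dom_identify_key_files_py code_files → Spec_identify_key_files_py code_files (identify_key_files_py code_files)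

-- ===== LEMMAS AND PROOFS =====

-- keys not in pats are untouched by the inner pattern loop
lemma inner_get_notmem (f : String) (pats : List String) (d : PySem.Dict String String)
    (p : String) (hp : p ∉ pats) :
    (pats.foldl
      (fun found q =>
        if !found.contains q && PySem.Str.endswith f q then found.insert q f else found)
      d).get? p = d.get? p := by
  induction pats generalizing d with
  | nil => rfl
  | cons q rest ih =>
    simp only [List.mem_cons, not_or] at hp
    simp only [List.foldl_cons]
    rw [ih _ hp.2]
    split_ifs with h
    · exact PySem.Dict.get?_insert_of_ne _ _ hp.1
    · rfl

-- effect of the inner pattern loop on a key p ∈ pats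
lemma inner_get_mem (f : String) (pats : List String) (d : PySem.Dict String String)
    (p : String) (hp : p ∈ pats) :
    (pats.foldl
      (fun found q =>
        if !found.contains q && PySem.Str.endswith f q then found.insert q f else found)
      d).get? p
    = (d.get? p).or (if PySem.Str.endswith f p then some f else none) := by
  induction pats generalizing d with
  | nil => cases hp
  | cons q rest ih =>
    simp only [List.foldl_cons]
    by_cases hq : p = q
    · subst hq
      have hstep :
          (if !d.contains p && PySem.Str.endswith f p then d.insert p f else d).get? p
            = (d.get? p).or (if PySem.Str.endswith f p then some f else none) := by
        rw [PySem.Dict.contains_eq_isSome_get?]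
        cases hget : d.get? p with
        | some v => simp [hget]
        | none =>
          by_cases he : PySem.Str.endswith f p
          all_goals rw [PySem.Str.endswith_eq] at he
          · simp [he, PySem.Dict.get?_insert_self]
          · simp [hget, he]
      by_cases hrest : p ∈ rest
      · rw [ih _ hrest, hstep]
        cases d.get? p <;> cases he : PySem.Str.endswith f p <;> simp
      · rw [inner_get_notmem f rest _ p hrest, hstep]
    · have hrest : p ∈ rest := by
        rcases List.mem_cons.mp hp with h | h
        · exact absurd h hq
        · exact h
      rw [ih _ hrest]
      have hstep :
          (if !d.contains q && PySem.Str.endswith f q then d.insert q f else d).get? p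
            = d.get? p := by
        split_ifs with h
        · exact PySem.Dict.get?_insert_of_ne _ _ hq
        · rfl
      rw [hstep]

-- the one-pass dict records, under each key pattern, the first file that ends with it
lemma outer_get (files : List String) (d : PySem.Dict String String)
    (p : String) (hp : p ∈ keyPatterns) :
    (files.foldl
      (fun found f =>
        keyPatterns.foldl
          (fun found q =>
            if !found.contains q && PySem.Str.endswith f q then found.insert q f else found)
          found)
      d).get? p
    = (d.get? p).or (files.find? (fun f => PySem.Str.endswith f p)) := by
  induction files generalizing d with
  | nil => simp
  | cons f fs ih =>
    simp only [List.foldl_cons]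
    rw [ih, inner_get_mem f keyPatterns d p hp, List.find?]
    cases d.get? p <;> cases he : PySem.Str.endswith f p <;> simp

lemma found_get (code_files : List String) (p : String) (hp : p ∈ keyPatterns) :
    (identify_key_files_py_alt_found code_files).get? p
      = (code_files.filter (fun f => PySem.Str.endswith f p)).head? := by
  unfold identify_key_files_py_alt_found
  rw [outer_get code_files PySem.Dict.empty p hp, List.head?_filter]
  simp [PySem.Dict.get?_empty]

-- ===== VERDICT (by name: the statement is the Claim_ definition above) =====
theorem identify_key_files_py_spec : Claim_equal_identify_key_files_py := by
  intro code_files _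
  unfold Spec_identify_key_files_py identify_key_files_py identify_key_files_py_alt
  rw [PySem.List.foldl_append_eq_flatMap, List.nil_append]
  congr 1
  have htake : (fun p => (code_files.filter (fun f => PySem.Str.endswith f p)).take 1)
      = (fun p => ((code_files.filter (fun f => PySem.Str.endswith f p)).head?).toList) := by
    funext p; exact List.take_one
  rw [htake, ← List.filterMap_eq_flatMap_toList]
  exact List.filterMap_congr (fun p hp => (found_get code_files p hp).symm)
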